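-- pv_equiv track=rewrite | github.com/richieBao/YingZao_PyPI | src/yingzao/ancientArchi/Gong/ChaAngQiAoV2.py | _pick_direction
-- ===== SOURCE A (Python) =====
-- def _pick_direction(candidates):
--     # 优先选择“向右下”（du>0 且 dv<0）
--     for du, dv in candidates:
--         if du > 0 and dv < 0:
--             return (du, dv)
--     for du, dv in candidates:
--         if du > 0:
--             return (du, dv)
--     return candidates[0]
-- ===== SOURCE B (Python) =====
-- def _pick_direction(candidates):
--     best_both = None
--     best_right = None
--     for p in candidates:
--         du, dv = p
--         if best_both is None and du > 0 and dv < 0: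
--             best_both = p
--         if best_right is None and du > 0:
--             best_right = p
--     if best_both is not None:
--         return best_both
--     if best_right is not None:
--         return best_right
--     return candidates[0]
-- ===== Notes on version B (the rewrite author's own statement) =====
-- stated objective: simpler
-- what changed: Replaces A's two full scans (one for du>0 and dv<0, one for du>0) by a single pass that records the first candidate of each tier in two set-once sentinels, then picks the better tier.
import Mathlib
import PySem

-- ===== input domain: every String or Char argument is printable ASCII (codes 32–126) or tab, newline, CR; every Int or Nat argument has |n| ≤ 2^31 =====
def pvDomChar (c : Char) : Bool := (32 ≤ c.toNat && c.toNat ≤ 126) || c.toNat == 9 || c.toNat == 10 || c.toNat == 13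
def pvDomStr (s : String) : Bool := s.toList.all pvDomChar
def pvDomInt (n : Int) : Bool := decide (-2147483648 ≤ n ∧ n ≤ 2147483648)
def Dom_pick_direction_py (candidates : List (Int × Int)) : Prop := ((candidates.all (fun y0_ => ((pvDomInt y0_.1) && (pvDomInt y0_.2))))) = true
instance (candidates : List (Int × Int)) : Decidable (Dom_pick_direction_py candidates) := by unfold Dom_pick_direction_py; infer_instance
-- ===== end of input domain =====

-- B replaces A's two sequential scans with a single fold keeping two set-once sentinels (first du>0∧dv<0, first du>0); simpler single pass, same values.


-- ===== PORT A =====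
-- first pass: first (du,dv) with du>0 and dv<0
def pvAFirst : List (Int × Int) → Option (Int × Int)
  | [] => none
  | (du, dv) :: t => if du > 0 ∧ dv < 0 then some (du, dv) else pvAFirst t

-- second pass: first (du,dv) with du>0
def pvASecond : List (Int × Int) → Option (Int × Int)
  | [] => none
  | (du, dv) :: t => if du > 0 then some (du, dv) else pvASecond t

def pick_direction_py (candidates : List (Int × Int)) : Int × Int :=
  match pvAFirst candidates with
  | some p => p
  | none =>
    match pvASecond candidates with
    | some p => p
    | none => (PySem.List.pyGet? candidates 0).getD (0, 0)  -- candidates[0]; Pre_ excludes the IndexError case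

-- ===== PORT B =====
-- single-pass step: set each sentinel once
def pvBStep (s : Option (Int × Int) × Option (Int × Int)) (p : Int × Int) :
    Option (Int × Int) × Option (Int × Int) :=
  (if s.1 = none ∧ p.1 > 0 ∧ p.2 < 0 then some p else s.1,
   if s.2 = none ∧ p.1 > 0 then some p else s.2)

def pick_direction_py_alt (candidates : List (Int × Int)) : Int × Int :=
  let s := candidates.foldl pvBStep (none, none)
  match s.1 with
  | some p => p
  | none =>
    match s.2 with
    | some p => p
    | none => (PySem.List.pyGet? candidates 0).getD (0, 0)  -- candidates[0]; Pre_ excludes the IndexError case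

-- ===== PRECONDITION & SPEC =====
-- Pre_ excludes the empty list, on which A (and B) raise IndexError at candidates[0].
def Pre_pick_direction_py (candidates : List (Int × Int)) : Prop := candidates ≠ []
instance (candidates : List (Int × Int)) : Decidable (Pre_pick_direction_py candidates) := by
  unfold Pre_pick_direction_py; infer_instance
def pvWitness_pick_direction_py : (List (Int × Int)) := [(1, 2), (2, -1)]

def Spec_pick_direction_py (candidates : List (Int × Int)) (out : Int × Int) : Prop := out = pick_direction_py_alt candidates
instance (candidates : List (Int × Int)) (out : Int × Int) : Decidable (Spec_pick_direction_py candidates out) := by unfold Spec_pick_direction_py; infer_instance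

-- ===== CLAIM (what is proved, stated in full; the proofs are below) =====
def Claim_equal_pick_direction_py : Prop := ∀ (candidates : List (Int × Int)), Dom_pick_direction_py candidates → Pre_pick_direction_py candidates → Spec_pick_direction_py candidates (pick_direction_py candidates)

-- ===== LEMMAS AND PROOFS =====
theorem pvB_fold_fst (cs : List (Int × Int)) (s : Option (Int × Int) × Option (Int × Int)) :
    (cs.foldl pvBStep s).1 = (s.1.orElse (fun _ => pvAFirst cs)) := by
  induction cs generalizing s with
  | nil => cases h : s.1 <;> simp [Option.orElse, pvAFirst, h]
  | cons p t ih =>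
    obtain ⟨du, dv⟩ := p
    simp only [List.foldl_cons, ih, pvBStep, pvAFirst]
    rcases h1 : s.1 with _ | q <;> split_ifs <;> simp_all [Option.orElse]

theorem pvB_fold_snd (cs : List (Int × Int)) (s : Option (Int × Int) × Option (Int × Int)) :
    (cs.foldl pvBStep s).2 = (s.2.orElse (fun _ => pvASecond cs)) := by
  induction cs generalizing s with
  | nil => cases h : s.2 <;> simp [Option.orElse, pvASecond, h]
  | cons p t ih =>
    obtain ⟨du, dv⟩ := p
    simp only [List.foldl_cons, ih, pvBStep, pvASecond]
    rcases h1 : s.2 with _ | q <;> split_ifs <;> simp_all [Option.orElse]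

-- ===== VERDICT (by name: the statement is the Claim_ definition above) =====
theorem pick_direction_py_spec : Claim_equal_pick_direction_py := by
  intro cs _ _
  unfold Spec_pick_direction_py pick_direction_py pick_direction_py_alt
  simp only [pvB_fold_fst, pvB_fold_snd, Option.orElse]
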